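-- pv_equiv track=rewrite | github.com/shaneholloman/mcp-memory-service | scripts/maintenance/auto_retag_memory.py | get_suggested_tags
-- ===== SOURCE A (Python) =====
-- from typing import List
--
-- def get_suggested_tags(content: str) -> List[str]:
--     """Generate tags based on content - same logic as bulk script."""
--     tags = set()
--     content_lower = content.lower()
--
--     # Version/Release detection
--     if any(x in content_lower for x in ["release", "v8", "v1", "version"]):
--         tags.add("release")
--     if "v8.64" in content_lower:
--         tags.add("v8.64")
--
--     # Technology detection
--     if "cloudflare" in content_lower:
--         tags.add("cloudflare")
--     if "api" in content_lower or "endpoint" in content_lower: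
--         tags.add("api")
--     if "hybrid" in content_lower or "sync" in content_lower:
--         tags.add("sync")
--     if "race condition" in content_lower or "tombstone" in content_lower:
--         tags.add("bug-fix")
--
--     # Session/Documentation
--     if any(x in content_lower for x in ["session", "summary", "captured"]):
--         tags.add("session-summary")
--     if "documentation" in content_lower or "guide" in content_lower:
--         tags.add("documentation")
--
--     # Tools/Workflows
--     if "ketchup" in content_lower or "tcr" in content_lower:
--         tags.add("workflow")
--     if "secondbrain" in content_lower.replace("-", ""):
--         tags.add("secondbrain")
--
--     # Project/Component detection
--     if "shodh" in content_lower: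
--         tags.add("shodh")
--     if "mcp-memory" in content_lower or "mcp_memory" in content_lower:
--         tags.add("mcp-memory-service")
--
--     # General categorization
--     if len(content) > 500:
--         tags.add("important")
--     if any(x in content_lower for x in ["template", "setup", "install"]):
--         tags.add("setup-guide")
--
--     # Fallback
--     if not tags:
--         tags.add("needs-categorization")
--
--     return sorted(list(tags))
-- ===== SOURCE B (Python) =====
-- # Different algorithm: instead of running an independent substring search per rule,
-- # B walks the lowered text once, position by position, matching every keyword of a
-- # flat (pattern -> tag) table at each offset (a naive multi-pattern scanner); the
-- # dash-stripped "secondbrain" text gets the same positional scan, and the length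
-- # and fallback rules stay arithmetic.  (objective: alternative, no speed claim)
--
-- KEYWORD_TAGS = [
--     ("release", "release"), ("v8", "release"), ("v1", "release"), ("version", "release"),
--     ("v8.64", "v8.64"),
--     ("cloudflare", "cloudflare"),
--     ("api", "api"), ("endpoint", "api"),
--     ("hybrid", "sync"), ("sync", "sync"),
--     ("race condition", "bug-fix"), ("tombstone", "bug-fix"),
--     ("session", "session-summary"), ("summary", "session-summary"), ("captured", "session-summary"),
--     ("documentation", "documentation"), ("guide", "documentation"),
--     ("ketchup", "workflow"), ("tcr", "workflow"),
--     ("shodh", "shodh"),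
--     ("mcp-memory", "mcp-memory-service"), ("mcp_memory", "mcp-memory-service"),
--     ("template", "setup-guide"), ("setup", "setup-guide"), ("install", "setup-guide"),
-- ]
--
-- def get_suggested_tags(content):
--     low = content.lower()
--     found = set()
--     for i in range(len(low) + 1):
--         for pat, tag in KEYWORD_TAGS:
--             if low.startswith(pat, i):
--                 found.add(tag)
--     dashless = low.replace("-", "")
--     if any(dashless.startswith("secondbrain", i) for i in range(len(dashless) + 1)):
--         found.add("secondbrain")
--     if len(content) > 500:
--         found.add("important")
--     if not found:
--         found.add("needs-categorization")
--     return sorted(found)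
-- ===== Notes on version B (the rewrite author's own statement) =====
-- stated objective: alternative
-- what changed: A runs fourteen independent whole-text substring searches over the lowered content; B is a naive multi-pattern scanner: one positional walk over the lowered text that tries every keyword of a flat (pattern, tag) table at each offset, with the same positional scan of the dash-stripped text for the secondbrain rule, collecting tags in a set and sorting at the end.
import Mathlib
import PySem

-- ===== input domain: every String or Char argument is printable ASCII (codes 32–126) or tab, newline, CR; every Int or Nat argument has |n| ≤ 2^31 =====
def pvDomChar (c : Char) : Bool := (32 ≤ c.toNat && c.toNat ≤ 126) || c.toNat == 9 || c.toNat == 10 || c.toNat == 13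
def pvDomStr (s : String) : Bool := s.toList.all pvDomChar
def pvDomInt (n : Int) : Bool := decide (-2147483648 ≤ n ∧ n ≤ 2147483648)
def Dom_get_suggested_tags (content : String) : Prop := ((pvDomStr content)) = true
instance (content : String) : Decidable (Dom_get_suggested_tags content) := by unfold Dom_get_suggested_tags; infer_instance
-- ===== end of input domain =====

set_option maxHeartbeats 1000000


-- B replaces A's fourteen independent substring searches by one positional scan of the
-- lowered text against a flat (pattern, tag) table (objective: alternative, no speed claim).

-- ===== PORT A =====
-- helper for A: 'if <cond>: tags.add(x)' (one Python statement)
def pvStep (s : PySem.Set String) (b : Bool) (x : String) : PySem.Set String :=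
  if b then PySem.Set.add s x else s

def get_suggested_tags (content : String) : List String :=
  let tags : PySem.Set String := PySem.Set.empty
  let content_lower := PySem.Str.lower content
  let tags := pvStep tags (PySem.Str.isIn "release" content_lower || PySem.Str.isIn "v8" content_lower || PySem.Str.isIn "v1" content_lower || PySem.Str.isIn "version" content_lower) "release"
  let tags := pvStep tags (PySem.Str.isIn "v8.64" content_lower) "v8.64"
  let tags := pvStep tags (PySem.Str.isIn "cloudflare" content_lower) "cloudflare"
  let tags := pvStep tags (PySem.Str.isIn "api" content_lower || PySem.Str.isIn "endpoint" content_lower) "api"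
  let tags := pvStep tags (PySem.Str.isIn "hybrid" content_lower || PySem.Str.isIn "sync" content_lower) "sync"
  let tags := pvStep tags (PySem.Str.isIn "race condition" content_lower || PySem.Str.isIn "tombstone" content_lower) "bug-fix"
  let tags := pvStep tags (PySem.Str.isIn "session" content_lower || PySem.Str.isIn "summary" content_lower || PySem.Str.isIn "captured" content_lower) "session-summary"
  let tags := pvStep tags (PySem.Str.isIn "documentation" content_lower || PySem.Str.isIn "guide" content_lower) "documentation"
  let tags := pvStep tags (PySem.Str.isIn "ketchup" content_lower || PySem.Str.isIn "tcr" content_lower) "workflow"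
  let tags := pvStep tags (PySem.Str.isIn "secondbrain" (PySem.Str.replace content_lower "-" "")) "secondbrain"
  let tags := pvStep tags (PySem.Str.isIn "shodh" content_lower) "shodh"
  let tags := pvStep tags (PySem.Str.isIn "mcp-memory" content_lower || PySem.Str.isIn "mcp_memory" content_lower) "mcp-memory-service"
  let tags := pvStep tags (decide (500 < PySem.Str.len content)) "important"
  let tags := pvStep tags (PySem.Str.isIn "template" content_lower || PySem.Str.isIn "setup" content_lower || PySem.Str.isIn "install" content_lower) "setup-guide"
  let tags := if tags = [] then PySem.Set.add tags "needs-categorization" else tags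
  PySem.List.sorted tags (fun x => x) false

-- ===== PORT B =====
-- KEYWORD_TAGS, patterns held as code-point lists
def bTable : List (List Char × String) :=
  [ ("release".toList, "release"), ("v8".toList, "release"), ("v1".toList, "release"), ("version".toList, "release"),
    ("v8.64".toList, "v8.64"),
    ("cloudflare".toList, "cloudflare"),
    ("api".toList, "api"), ("endpoint".toList, "api"),
    ("hybrid".toList, "sync"), ("sync".toList, "sync"),
    ("race condition".toList, "bug-fix"), ("tombstone".toList, "bug-fix"),
    ("session".toList, "session-summary"), ("summary".toList, "session-summary"), ("captured".toList, "session-summary"),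
    ("documentation".toList, "documentation"), ("guide".toList, "documentation"),
    ("ketchup".toList, "workflow"), ("tcr".toList, "workflow"),
    ("shodh".toList, "shodh"),
    ("mcp-memory".toList, "mcp-memory-service"), ("mcp_memory".toList, "mcp-memory-service"),
    ("template".toList, "setup-guide"), ("setup".toList, "setup-guide"), ("install".toList, "setup-guide") ]

-- inner loop: 'for pat, tag in KEYWORD_TAGS: if low.startswith(pat, i): found.add(tag)'
-- ('low.startswith(pat, i)' with 0 ≤ i is exactly 'Chars.startswith (low.drop i.toNat) pat')
def bScanPos (low : List Char) (f : PySem.Set String) (i : Int) : PySem.Set String :=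
  bTable.foldl (fun f r => if PySem.Chars.startswith (low.drop i.toNat) r.1 then PySem.Set.add f r.2 else f) f

def get_suggested_tags_alt (content : String) : List String :=
  let low := (PySem.Str.lower content).toList
  let found : PySem.Set String := PySem.Set.empty
  let found := (PySem.List.pyRange 0 ((low.length : Int) + 1) 1).foldl (bScanPos low) found
  let dashless := PySem.Chars.replace low "-".toList "".toList
  let found := if (PySem.List.pyRange 0 ((dashless.length : Int) + 1) 1).any
      (fun i => PySem.Chars.startswith (dashless.drop i.toNat) "secondbrain".toList) then
      PySem.Set.add found "secondbrain" else found
  let found := if decide (500 < PySem.Str.len content) then PySem.Set.add found "important" else found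
  let found := if found = [] then PySem.Set.add found "needs-categorization" else found
  PySem.List.sorted found (fun x => x) false

-- ===== PRECONDITION & SPEC =====
def Spec_get_suggested_tags (content : String) (out : List String) : Prop := out = get_suggested_tags_alt content
instance (content : String) (out : List String) : Decidable (Spec_get_suggested_tags content out) := by unfold Spec_get_suggested_tags; infer_instance

-- ===== CLAIM (what is proved, stated in full; the proofs are below) =====
def Claim_equal_get_suggested_tags : Prop := ∀ (content : String), Dom_get_suggested_tags content → Spec_get_suggested_tags content (get_suggested_tags content)

-- ===== LEMMAS AND PROOFS =====

/-- select the tags whose flag is set -/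
def pvPick (l : List (Bool × String)) : List String := (l.filter Prod.fst).map Prod.snd

/-- A's chain of conditional set-inserts, as a fold -/
def pvBuild (s : PySem.Set String) (l : List (Bool × String)) : PySem.Set String :=
  l.foldl (fun s p => pvStep s p.1 p.2) s

theorem pvPick_cons (b : Bool) (x : String) (l : List (Bool × String)) :
    pvPick ((b, x) :: l) = (if b then [x] else []) ++ pvPick l := by
  cases b <;> simp [pvPick]

theorem pvSet_add_not_mem {s : PySem.Set String} {x : String} (h : x ∉ s) :
    PySem.Set.add s x = s ++ [x] := by
  simp [PySem.Set.add, PySem.Set.contains]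
  intro hc
  exact absurd hc h

theorem pvBuild_eq (l : List (Bool × String)) (s : PySem.Set String)
    (hnd : (l.map Prod.snd).Nodup) (hout : ∀ x ∈ l.map Prod.snd, x ∉ s) :
    pvBuild s l = s ++ pvPick l := by
  induction l generalizing s with
  | nil => simp [pvBuild, pvPick]
  | cons p t ih =>
    obtain ⟨b, x⟩ := p
    simp only [List.map_cons, List.nodup_cons, List.mem_cons] at hnd hout
    rw [pvPick_cons]
    cases b with
    | false =>
      simp only [pvBuild, List.foldl_cons, pvStep, Bool.false_eq_true, if_false] at ih ⊢
      rw [ih s hnd.2 (fun y hy => hout y (Or.inr hy))]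
      simp
    | true =>
      simp only [pvBuild, List.foldl_cons, pvStep, if_true] at ih ⊢
      rw [pvSet_add_not_mem (hout x (Or.inl rfl))]
      rw [ih (s ++ [x]) hnd.2]
      · simp
      · intro y hy
        simp only [List.mem_append, List.mem_singleton]
        rintro (h | rfl)
        · exact hout y (Or.inr hy) h
        · exact hnd.1 hy

/-- the A-side items, in A's insertion order -/
def pvItemsA (c low : String) : List (Bool × String) :=
  [ (PySem.Str.isIn "release" low || PySem.Str.isIn "v8" low || PySem.Str.isIn "v1" low || PySem.Str.isIn "version" low, "release"),
    (PySem.Str.isIn "v8.64" low, "v8.64"),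
    (PySem.Str.isIn "cloudflare" low, "cloudflare"),
    (PySem.Str.isIn "api" low || PySem.Str.isIn "endpoint" low, "api"),
    (PySem.Str.isIn "hybrid" low || PySem.Str.isIn "sync" low, "sync"),
    (PySem.Str.isIn "race condition" low || PySem.Str.isIn "tombstone" low, "bug-fix"),
    (PySem.Str.isIn "session" low || PySem.Str.isIn "summary" low || PySem.Str.isIn "captured" low, "session-summary"),
    (PySem.Str.isIn "documentation" low || PySem.Str.isIn "guide" low, "documentation"),
    (PySem.Str.isIn "ketchup" low || PySem.Str.isIn "tcr" low, "workflow"),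
    (PySem.Str.isIn "secondbrain" (PySem.Str.replace low "-" ""), "secondbrain"),
    (PySem.Str.isIn "shodh" low, "shodh"),
    (PySem.Str.isIn "mcp-memory" low || PySem.Str.isIn "mcp_memory" low, "mcp-memory-service"),
    (decide (500 < PySem.Str.len c), "important"),
    (PySem.Str.isIn "template" low || PySem.Str.isIn "setup" low || PySem.Str.isIn "install" low, "setup-guide") ]

/-- port A with its fourteen branch conditions abstracted out -/
def pvMirror (b1 b2 b3 b4 b5 b6 b7 b8 b9 b10 b11 b12 b13 b14 : Bool) : List String :=
  let tags : PySem.Set String := PySem.Set.empty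
  let tags := pvStep tags b1 "release"
  let tags := pvStep tags b2 "v8.64"
  let tags := pvStep tags b3 "cloudflare"
  let tags := pvStep tags b4 "api"
  let tags := pvStep tags b5 "sync"
  let tags := pvStep tags b6 "bug-fix"
  let tags := pvStep tags b7 "session-summary"
  let tags := pvStep tags b8 "documentation"
  let tags := pvStep tags b9 "workflow"
  let tags := pvStep tags b10 "secondbrain"
  let tags := pvStep tags b11 "shodh"
  let tags := pvStep tags b12 "mcp-memory-service"
  let tags := pvStep tags b13 "important"
  let tags := pvStep tags b14 "setup-guide"
  let tags := if tags = [] then PySem.Set.add tags "needs-categorization" else tags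
  PySem.List.sorted tags (fun x => x) false

theorem pvMirror_eq (b1 b2 b3 b4 b5 b6 b7 b8 b9 b10 b11 b12 b13 b14 : Bool) :
    pvMirror b1 b2 b3 b4 b5 b6 b7 b8 b9 b10 b11 b12 b13 b14 =
      (let L := pvPick [(b1, "release"), (b2, "v8.64"), (b3, "cloudflare"), (b4, "api"),
        (b5, "sync"), (b6, "bug-fix"), (b7, "session-summary"), (b8, "documentation"),
        (b9, "workflow"), (b10, "secondbrain"), (b11, "shodh"), (b12, "mcp-memory-service"),
        (b13, "important"), (b14, "setup-guide")]
       PySem.List.sorted (if L = [] then PySem.Set.add L "needs-categorization" else L)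
         (fun x => x) false) := by
  have h := pvBuild_eq [(b1, "release"), (b2, "v8.64"), (b3, "cloudflare"), (b4, "api"),
      (b5, "sync"), (b6, "bug-fix"), (b7, "session-summary"), (b8, "documentation"),
      (b9, "workflow"), (b10, "secondbrain"), (b11, "shodh"), (b12, "mcp-memory-service"),
      (b13, "important"), (b14, "setup-guide")] PySem.Set.empty
    (by simp only [List.map_cons, List.map_nil]; decide) (by intro x hx; simp [PySem.Set.empty])
  have h2 : pvMirror b1 b2 b3 b4 b5 b6 b7 b8 b9 b10 b11 b12 b13 b14 =
      (let L := pvBuild PySem.Set.empty [(b1, "release"), (b2, "v8.64"), (b3, "cloudflare"), (b4, "api"),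
        (b5, "sync"), (b6, "bug-fix"), (b7, "session-summary"), (b8, "documentation"),
        (b9, "workflow"), (b10, "secondbrain"), (b11, "shodh"), (b12, "mcp-memory-service"),
        (b13, "important"), (b14, "setup-guide")]
       PySem.List.sorted (if L = [] then PySem.Set.add L "needs-categorization" else L)
         (fun x => x) false) := rfl
  rw [h2]
  show PySem.List.sorted _ _ _ = PySem.List.sorted _ _ _
  rw [h]
  rfl

theorem pvA_eq (content : String) :
    get_suggested_tags content =
      PySem.List.sorted
        (if pvPick (pvItemsA content (PySem.Str.lower content)) = []
         then PySem.Set.add (pvPick (pvItemsA content (PySem.Str.lower content))) "needs-categorization"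
         else pvPick (pvItemsA content (PySem.Str.lower content))) (fun x => x) false := by
  have hm : get_suggested_tags content =
      pvMirror
        (PySem.Str.isIn "release" (PySem.Str.lower content) || PySem.Str.isIn "v8" (PySem.Str.lower content) || PySem.Str.isIn "v1" (PySem.Str.lower content) || PySem.Str.isIn "version" (PySem.Str.lower content))
        (PySem.Str.isIn "v8.64" (PySem.Str.lower content))
        (PySem.Str.isIn "cloudflare" (PySem.Str.lower content))
        (PySem.Str.isIn "api" (PySem.Str.lower content) || PySem.Str.isIn "endpoint" (PySem.Str.lower content))
        (PySem.Str.isIn "hybrid" (PySem.Str.lower content) || PySem.Str.isIn "sync" (PySem.Str.lower content))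
        (PySem.Str.isIn "race condition" (PySem.Str.lower content) || PySem.Str.isIn "tombstone" (PySem.Str.lower content))
        (PySem.Str.isIn "session" (PySem.Str.lower content) || PySem.Str.isIn "summary" (PySem.Str.lower content) || PySem.Str.isIn "captured" (PySem.Str.lower content))
        (PySem.Str.isIn "documentation" (PySem.Str.lower content) || PySem.Str.isIn "guide" (PySem.Str.lower content))
        (PySem.Str.isIn "ketchup" (PySem.Str.lower content) || PySem.Str.isIn "tcr" (PySem.Str.lower content))
        (PySem.Str.isIn "secondbrain" (PySem.Str.replace (PySem.Str.lower content) "-" ""))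
        (PySem.Str.isIn "shodh" (PySem.Str.lower content))
        (PySem.Str.isIn "mcp-memory" (PySem.Str.lower content) || PySem.Str.isIn "mcp_memory" (PySem.Str.lower content))
        (decide (500 < PySem.Str.len content))
        (PySem.Str.isIn "template" (PySem.Str.lower content) || PySem.Str.isIn "setup" (PySem.Str.lower content) || PySem.Str.isIn "install" (PySem.Str.lower content)) := rfl
  rw [hm, pvMirror_eq]
  rfl

theorem mem_pvPick (l : List (Bool × String)) (t : String) :
    t ∈ pvPick l ↔ ∃ p ∈ l, p.1 = true ∧ p.2 = t := by
  simp [pvPick, List.mem_filter, List.mem_map]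

theorem nodup_pvPick (l : List (Bool × String)) (h : (l.map Prod.snd).Nodup) :
    (pvPick l).Nodup :=
  ((List.Sublist.map Prod.snd (List.filter_sublist (l := l))).nodup h)

/-- membership through a conditional-add fold (B's inner loop over the table) -/
theorem mem_condAddFold {α : Type} (l : List α) (c : α → Bool) (g : α → String)
    (f : PySem.Set String) (t : String) :
    t ∈ l.foldl (fun f r => if c r then PySem.Set.add f (g r) else f) f ↔
      t ∈ f ∨ ∃ r ∈ l, c r = true ∧ g r = t := by
  induction l generalizing f with
  | nil => simp
  | cons a l ih =>
    simp only [List.foldl_cons, List.mem_cons, exists_eq_or_imp]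
    rw [ih]
    cases ha : c a with
    | false =>
      simp only [ha, Bool.false_eq_true, if_false, false_and, false_or]
    | true =>
      simp only [ha, if_true, PySem.Set.mem_add, true_and]
      constructor
      · rintro ((hf | hg) | hr)
        · exact Or.inl hf
        · exact Or.inr (Or.inl hg.symm)
        · exact Or.inr (Or.inr hr)
      · rintro (hf | hg | hr)
        · exact Or.inl (Or.inl hf)
        · exact Or.inl (Or.inr hg.symm)
        · exact Or.inr hr

theorem nodup_condAddFold {α : Type} (l : List α) (c : α → Bool) (g : α → String)
    (f : PySem.Set String) (h : f.Nodup) :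
    (l.foldl (fun f r => if c r then PySem.Set.add f (g r) else f) f).Nodup := by
  induction l generalizing f with
  | nil => exact h
  | cons a l ih =>
    simp only [List.foldl_cons]
    cases ha : c a with
    | false => simp only [ha, Bool.false_eq_true, if_false]; exact ih _ h
    | true => simp only [ha, if_true]; exact ih _ (PySem.Set.nodup_add _ _ h)

/-- membership through B's positional scan -/
theorem mem_scan (low : List Char) (ps : List Int) (f : PySem.Set String) (t : String) :
    t ∈ ps.foldl (bScanPos low) f ↔
      t ∈ f ∨ ∃ i ∈ ps, ∃ r ∈ bTable,
        PySem.Chars.startswith (low.drop i.toNat) r.1 = true ∧ r.2 = t := by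
  induction ps generalizing f with
  | nil => simp
  | cons i ps ih =>
    simp only [List.foldl_cons, List.mem_cons, exists_eq_or_imp]
    rw [ih]
    rw [show bScanPos low f i =
      bTable.foldl (fun f r => if PySem.Chars.startswith (low.drop i.toNat) r.1
        then PySem.Set.add f r.2 else f) f from rfl]
    rw [mem_condAddFold bTable (fun r => PySem.Chars.startswith (low.drop i.toNat) r.1) Prod.snd]
    exact or_assoc

theorem nodup_scan (low : List Char) (ps : List Int) (f : PySem.Set String) (h : f.Nodup) :
    (ps.foldl (bScanPos low) f).Nodup := by
  induction ps generalizing f with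
  | nil => exact h
  | cons i ps ih =>
    exact ih _ (nodup_condAddFold bTable _ Prod.snd f h)

/-- a pattern matches at some scanned position iff it is a substring -/
theorem exists_pos_iff_isIn (low p : List Char) :
    (∃ i ∈ PySem.List.pyRange 0 ((low.length : Int) + 1) 1,
        PySem.Chars.startswith (low.drop i.toNat) p = true) ↔
      PySem.Chars.isIn p low = true := by
  constructor
  · rintro ⟨i, _, hs⟩
    rw [← PySem.Chars.exists_prefix_drop_iff_isIn]
    exact ⟨i.toNat, (PySem.Chars.startswith_iff _ _).mp hs⟩
  · intro h
    obtain ⟨j, hj⟩ := (PySem.Chars.exists_prefix_drop_iff_isIn p low).mpr h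
    have hk : p <+: low.drop (min j low.length) := by
      rcases le_total j low.length with hle | hle
      · rwa [min_eq_left hle]
      · rw [min_eq_right hle, List.drop_length]
        rwa [List.drop_eq_nil_of_le hle] at hj
    refine ⟨(min j low.length : Nat), ?_, ?_⟩
    · rw [PySem.List.mem_pyRange_one]
      constructor
      · positivity
      · have := min_le_right j low.length
        omega
    · rw [Int.toNat_natCast]
      exact (PySem.Chars.startswith_iff _ _).mpr hk

theorem scan_iff (low : List Char) (t : String) :
    (∃ i ∈ PySem.List.pyRange 0 ((low.length : Int) + 1) 1, ∃ r ∈ bTable,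
        PySem.Chars.startswith (low.drop i.toNat) r.1 = true ∧ r.2 = t) ↔
      ∃ r ∈ bTable, PySem.Chars.isIn r.1 low = true ∧ r.2 = t := by
  constructor
  · rintro ⟨i, hi, r, hr, hs, ht⟩
    exact ⟨r, hr, (exists_pos_iff_isIn low r.1).mp ⟨i, hi, hs⟩, ht⟩
  · rintro ⟨r, hr, hin, ht⟩
    obtain ⟨i, hi, hs⟩ := (exists_pos_iff_isIn low r.1).mpr hin
    exact ⟨i, hi, r, hr, hs, ht⟩

/-- membership through 'if c then s.add(x)' -/
theorem mem_iteAdd (c : Prop) [Decidable c] (s : PySem.Set String) (x t : String) :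
    t ∈ (if c then PySem.Set.add s x else s) ↔ t ∈ s ∨ (c ∧ t = x) := by
  split_ifs with h <;> simp [PySem.Set.mem_add, h]

theorem nodup_iteAdd (c : Prop) [Decidable c] (s : PySem.Set String) (x : String)
    (h : s.Nodup) : (if c then PySem.Set.add s x else s).Nodup := by
  split_ifs
  exacts [PySem.Set.nodup_add _ _ h, h]

/-- B's pre-fallback tag set -/
def pvBFound (content : String) : PySem.Set String :=
  let low := (PySem.Str.lower content).toList
  let found : PySem.Set String := PySem.Set.empty
  let found := (PySem.List.pyRange 0 ((low.length : Int) + 1) 1).foldl (bScanPos low) found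
  let dashless := PySem.Chars.replace low "-".toList "".toList
  let found := if (PySem.List.pyRange 0 ((dashless.length : Int) + 1) 1).any
      (fun i => PySem.Chars.startswith (dashless.drop i.toNat) "secondbrain".toList) then
      PySem.Set.add found "secondbrain" else found
  if decide (500 < PySem.Str.len content) then PySem.Set.add found "important" else found

theorem pvB_eq (content : String) :
    get_suggested_tags_alt content =
      PySem.List.sorted
        (if pvBFound content = []
         then PySem.Set.add (pvBFound content) "needs-categorization"
         else pvBFound content) (fun x => x) false := rfl

theorem nodup_pvBFound (content : String) : (pvBFound content).Nodup := by
  simp only [pvBFound]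
  exact nodup_iteAdd _ _ _ (nodup_iteAdd _ _ _ (nodup_scan _ _ _ List.nodup_nil))

set_option maxHeartbeats 2000000 in
theorem mem_pvBFound (content : String) (t : String) :
    t ∈ pvBFound content ↔
      (∃ r ∈ bTable, PySem.Chars.isIn r.1 (PySem.Str.lower content).toList = true ∧ r.2 = t) ∨
      (PySem.Chars.isIn "secondbrain".toList
          (PySem.Chars.replace (PySem.Str.lower content).toList "-".toList "".toList) = true ∧
        "secondbrain" = t) ∨
      (500 < PySem.Str.len content ∧ "important" = t) := by
  unfold pvBFound
  rw [mem_iteAdd, mem_iteAdd, mem_scan]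
  simp only [PySem.Set.empty, List.not_mem_nil, false_or, List.any_eq_true, decide_eq_true_eq,
    exists_pos_iff_isIn, scan_iff]
  constructor
  · rintro ((h | ⟨h, ht⟩) | ⟨h, ht⟩)
    exacts [Or.inl h, Or.inr (Or.inl ⟨h, ht.symm⟩), Or.inr (Or.inr ⟨h, ht.symm⟩)]
  · rintro (h | ⟨h, ht⟩ | ⟨h, ht⟩)
    exacts [Or.inl (Or.inl h), Or.inl (Or.inr ⟨h, ht.symm⟩), Or.inr ⟨h, ht.symm⟩]

set_option maxHeartbeats 2000000 in
theorem pvMem_iff (content : String) (t : String) :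
    t ∈ pvPick (pvItemsA content (PySem.Str.lower content)) ↔ t ∈ pvBFound content := by
  rw [mem_pvPick, mem_pvBFound]
  simp only [pvItemsA, bTable, List.mem_cons, List.not_mem_nil, or_false, exists_eq_or_imp,
    exists_eq_left, PySem.Str.isIn_eq, PySem.Str.toList_replace, PySem.Str.len_eq,
    Bool.or_eq_true, decide_eq_true_eq]
  constructor
  · rintro (⟨(((h|h)|h)|h), ht⟩ | ⟨h, ht⟩ | ⟨h, ht⟩ | ⟨(h|h), ht⟩ | ⟨(h|h), ht⟩ | ⟨(h|h), ht⟩ | ⟨((h|h)|h), ht⟩ | ⟨(h|h), ht⟩ | ⟨(h|h), ht⟩ | ⟨h, ht⟩ | ⟨h, ht⟩ | ⟨(h|h), ht⟩ | ⟨h, ht⟩ | ⟨((h|h)|h), ht⟩)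
    exacts [Or.inl (Or.inl (⟨h, ht⟩)),
      Or.inl (Or.inr (Or.inl (⟨h, ht⟩))),
      Or.inl (Or.inr (Or.inr (Or.inl (⟨h, ht⟩)))),
      Or.inl (Or.inr (Or.inr (Or.inr (Or.inl (⟨h, ht⟩))))),
      Or.inl (Or.inr (Or.inr (Or.inr (Or.inr (Or.inl (⟨h, ht⟩)))))),
      Or.inl (Or.inr (Or.inr (Or.inr (Or.inr (Or.inr (Or.inl (⟨h, ht⟩))))))),
      Or.inl (Or.inr (Or.inr (Or.inr (Or.inr (Or.inr (Or.inr (Or.inl (⟨h, ht⟩)))))))),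
      Or.inl (Or.inr (Or.inr (Or.inr (Or.inr (Or.inr (Or.inr (Or.inr (Or.inl (⟨h, ht⟩))))))))),
      Or.inl (Or.inr (Or.inr (Or.inr (Or.inr (Or.inr (Or.inr (Or.inr (Or.inr (Or.inl (⟨h, ht⟩)))))))))),
      Or.inl (Or.inr (Or.inr (Or.inr (Or.inr (Or.inr (Or.inr (Or.inr (Or.inr (Or.inr (Or.inl (⟨h, ht⟩))))))))))),
      Or.inl (Or.inr (Or.inr (Or.inr (Or.inr (Or.inr (Or.inr (Or.inr (Or.inr (Or.inr (Or.inr (Or.inl (⟨h, ht⟩)))))))))))),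
      Or.inl (Or.inr (Or.inr (Or.inr (Or.inr (Or.inr (Or.inr (Or.inr (Or.inr (Or.inr (Or.inr (Or.inr (Or.inl (⟨h, ht⟩))))))))))))),
      Or.inl (Or.inr (Or.inr (Or.inr (Or.inr (Or.inr (Or.inr (Or.inr (Or.inr (Or.inr (Or.inr (Or.inr (Or.inr (Or.inl (⟨h, ht⟩)))))))))))))),
      Or.inl (Or.inr (Or.inr (Or.inr (Or.inr (Or.inr (Or.inr (Or.inr (Or.inr (Or.inr (Or.inr (Or.inr (Or.inr (Or.inr (Or.inl (⟨h, ht⟩))))))))))))))),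
      Or.inl (Or.inr (Or.inr (Or.inr (Or.inr (Or.inr (Or.inr (Or.inr (Or.inr (Or.inr (Or.inr (Or.inr (Or.inr (Or.inr (Or.inr (Or.inl (⟨h, ht⟩)))))))))))))))),
      Or.inl (Or.inr (Or.inr (Or.inr (Or.inr (Or.inr (Or.inr (Or.inr (Or.inr (Or.inr (Or.inr (Or.inr (Or.inr (Or.inr (Or.inr (Or.inr (Or.inl (⟨h, ht⟩))))))))))))))))),
      Or.inl (Or.inr (Or.inr (Or.inr (Or.inr (Or.inr (Or.inr (Or.inr (Or.inr (Or.inr (Or.inr (Or.inr (Or.inr (Or.inr (Or.inr (Or.inr (Or.inr (Or.inl (⟨h, ht⟩)))))))))))))))))),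
      Or.inl (Or.inr (Or.inr (Or.inr (Or.inr (Or.inr (Or.inr (Or.inr (Or.inr (Or.inr (Or.inr (Or.inr (Or.inr (Or.inr (Or.inr (Or.inr (Or.inr (Or.inr (Or.inl (⟨h, ht⟩))))))))))))))))))),
      Or.inl (Or.inr (Or.inr (Or.inr (Or.inr (Or.inr (Or.inr (Or.inr (Or.inr (Or.inr (Or.inr (Or.inr (Or.inr (Or.inr (Or.inr (Or.inr (Or.inr (Or.inr (Or.inr (Or.inl (⟨h, ht⟩)))))))))))))))))))),
      Or.inr (Or.inl ⟨h, ht⟩),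
      Or.inl (Or.inr (Or.inr (Or.inr (Or.inr (Or.inr (Or.inr (Or.inr (Or.inr (Or.inr (Or.inr (Or.inr (Or.inr (Or.inr (Or.inr (Or.inr (Or.inr (Or.inr (Or.inr (Or.inr (Or.inl (⟨h, ht⟩))))))))))))))))))))),
      Or.inl (Or.inr (Or.inr (Or.inr (Or.inr (Or.inr (Or.inr (Or.inr (Or.inr (Or.inr (Or.inr (Or.inr (Or.inr (Or.inr (Or.inr (Or.inr (Or.inr (Or.inr (Or.inr (Or.inr (Or.inr (Or.inl (⟨h, ht⟩)))))))))))))))))))))),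
      Or.inl (Or.inr (Or.inr (Or.inr (Or.inr (Or.inr (Or.inr (Or.inr (Or.inr (Or.inr (Or.inr (Or.inr (Or.inr (Or.inr (Or.inr (Or.inr (Or.inr (Or.inr (Or.inr (Or.inr (Or.inr (Or.inr (Or.inl (⟨h, ht⟩))))))))))))))))))))))),
      Or.inr (Or.inr ⟨h, ht⟩),
      Or.inl (Or.inr (Or.inr (Or.inr (Or.inr (Or.inr (Or.inr (Or.inr (Or.inr (Or.inr (Or.inr (Or.inr (Or.inr (Or.inr (Or.inr (Or.inr (Or.inr (Or.inr (Or.inr (Or.inr (Or.inr (Or.inr (Or.inr (Or.inl (⟨h, ht⟩)))))))))))))))))))))))),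
      Or.inl (Or.inr (Or.inr (Or.inr (Or.inr (Or.inr (Or.inr (Or.inr (Or.inr (Or.inr (Or.inr (Or.inr (Or.inr (Or.inr (Or.inr (Or.inr (Or.inr (Or.inr (Or.inr (Or.inr (Or.inr (Or.inr (Or.inr (Or.inr (Or.inl (⟨h, ht⟩))))))))))))))))))))))))),
      Or.inl (Or.inr (Or.inr (Or.inr (Or.inr (Or.inr (Or.inr (Or.inr (Or.inr (Or.inr (Or.inr (Or.inr (Or.inr (Or.inr (Or.inr (Or.inr (Or.inr (Or.inr (Or.inr (Or.inr (Or.inr (Or.inr (Or.inr (Or.inr (Or.inr (⟨h, ht⟩)))))))))))))))))))))))))]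
  · rintro ((⟨h, ht⟩ | ⟨h, ht⟩ | ⟨h, ht⟩ | ⟨h, ht⟩ | ⟨h, ht⟩ | ⟨h, ht⟩ | ⟨h, ht⟩ | ⟨h, ht⟩ | ⟨h, ht⟩ | ⟨h, ht⟩ | ⟨h, ht⟩ | ⟨h, ht⟩ | ⟨h, ht⟩ | ⟨h, ht⟩ | ⟨h, ht⟩ | ⟨h, ht⟩ | ⟨h, ht⟩ | ⟨h, ht⟩ | ⟨h, ht⟩ | ⟨h, ht⟩ | ⟨h, ht⟩ | ⟨h, ht⟩ | ⟨h, ht⟩ | ⟨h, ht⟩ | ⟨h, ht⟩) | ⟨h, ht⟩ | ⟨h, ht⟩)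
    exacts [Or.inl (⟨Or.inl (Or.inl (Or.inl (h))), ht⟩),
      Or.inl (⟨Or.inl (Or.inl (Or.inr (h))), ht⟩),
      Or.inl (⟨Or.inl (Or.inr (h)), ht⟩),
      Or.inl (⟨Or.inr (h), ht⟩),
      Or.inr (Or.inl (⟨h, ht⟩)),
      Or.inr (Or.inr (Or.inl (⟨h, ht⟩))),
      Or.inr (Or.inr (Or.inr (Or.inl (⟨Or.inl (h), ht⟩)))),
      Or.inr (Or.inr (Or.inr (Or.inl (⟨Or.inr (h), ht⟩)))),
      Or.inr (Or.inr (Or.inr (Or.inr (Or.inl (⟨Or.inl (h), ht⟩))))),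
      Or.inr (Or.inr (Or.inr (Or.inr (Or.inl (⟨Or.inr (h), ht⟩))))),
      Or.inr (Or.inr (Or.inr (Or.inr (Or.inr (Or.inl (⟨Or.inl (h), ht⟩)))))),
      Or.inr (Or.inr (Or.inr (Or.inr (Or.inr (Or.inl (⟨Or.inr (h), ht⟩)))))),
      Or.inr (Or.inr (Or.inr (Or.inr (Or.inr (Or.inr (Or.inl (⟨Or.inl (Or.inl (h)), ht⟩))))))),
      Or.inr (Or.inr (Or.inr (Or.inr (Or.inr (Or.inr (Or.inl (⟨Or.inl (Or.inr (h)), ht⟩))))))),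
      Or.inr (Or.inr (Or.inr (Or.inr (Or.inr (Or.inr (Or.inl (⟨Or.inr (h), ht⟩))))))),
      Or.inr (Or.inr (Or.inr (Or.inr (Or.inr (Or.inr (Or.inr (Or.inl (⟨Or.inl (h), ht⟩)))))))),
      Or.inr (Or.inr (Or.inr (Or.inr (Or.inr (Or.inr (Or.inr (Or.inl (⟨Or.inr (h), ht⟩)))))))),
      Or.inr (Or.inr (Or.inr (Or.inr (Or.inr (Or.inr (Or.inr (Or.inr (Or.inl (⟨Or.inl (h), ht⟩))))))))),
      Or.inr (Or.inr (Or.inr (Or.inr (Or.inr (Or.inr (Or.inr (Or.inr (Or.inl (⟨Or.inr (h), ht⟩))))))))),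
      Or.inr (Or.inr (Or.inr (Or.inr (Or.inr (Or.inr (Or.inr (Or.inr (Or.inr (Or.inr (Or.inl (⟨h, ht⟩))))))))))),
      Or.inr (Or.inr (Or.inr (Or.inr (Or.inr (Or.inr (Or.inr (Or.inr (Or.inr (Or.inr (Or.inr (Or.inl (⟨Or.inl (h), ht⟩)))))))))))),
      Or.inr (Or.inr (Or.inr (Or.inr (Or.inr (Or.inr (Or.inr (Or.inr (Or.inr (Or.inr (Or.inr (Or.inl (⟨Or.inr (h), ht⟩)))))))))))),
      Or.inr (Or.inr (Or.inr (Or.inr (Or.inr (Or.inr (Or.inr (Or.inr (Or.inr (Or.inr (Or.inr (Or.inr (Or.inr (⟨Or.inl (Or.inl (h)), ht⟩))))))))))))),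
      Or.inr (Or.inr (Or.inr (Or.inr (Or.inr (Or.inr (Or.inr (Or.inr (Or.inr (Or.inr (Or.inr (Or.inr (Or.inr (⟨Or.inl (Or.inr (h)), ht⟩))))))))))))),
      Or.inr (Or.inr (Or.inr (Or.inr (Or.inr (Or.inr (Or.inr (Or.inr (Or.inr (Or.inr (Or.inr (Or.inr (Or.inr (⟨Or.inr (h), ht⟩))))))))))))),
      Or.inr (Or.inr (Or.inr (Or.inr (Or.inr (Or.inr (Or.inr (Or.inr (Or.inr (Or.inl (⟨h, ht⟩)))))))))),
      Or.inr (Or.inr (Or.inr (Or.inr (Or.inr (Or.inr (Or.inr (Or.inr (Or.inr (Or.inr (Or.inr (Or.inr (Or.inl (⟨h, ht⟩)))))))))))))]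

-- ===== VERDICT (by name: the statement is the Claim_ definition above) =====
set_option maxHeartbeats 2000000 in
theorem get_suggested_tags_spec : Claim_equal_get_suggested_tags := by
  intro content _
  unfold Spec_get_suggested_tags
  rw [pvA_eq, pvB_eq]
  have hmem := pvMem_iff content
  have hndA : (pvPick (pvItemsA content (PySem.Str.lower content))).Nodup :=
    nodup_pvPick _ (by simp only [pvItemsA, List.map_cons, List.map_nil]; decide)
  have hndB := nodup_pvBFound content
  by_cases h : pvPick (pvItemsA content (PySem.Str.lower content)) = []
  · have hB : pvBFound content = [] := by
      rw [List.eq_nil_iff_forall_not_mem]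
      intro t ht
      rw [← hmem t, h] at ht
      exact List.not_mem_nil ht
    rw [if_pos h, if_pos hB, h, hB]
  · have hB : pvBFound content ≠ [] := by
      intro hb
      apply h
      rw [List.eq_nil_iff_forall_not_mem]
      intro t ht
      rw [hmem t, hb] at ht
      exact List.not_mem_nil ht
    rw [if_neg h, if_neg hB]
    exact PySem.List.sorted_eq_sorted_of_perm _ _ _ (fun a b hab => hab)
      ((List.perm_ext_iff_of_nodup hndA hndB).mpr hmem)
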